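-- pv_equiv track=rewrite | github.com/OnLee3/backjoon-with-python | 프로그래머스/lv1/86491. 최소직사각형/최소직사각형.py | solution
-- ===== SOURCE A (Python) =====
-- def solution(sizes):
--     max_width = 0
--     max_height = 0
--
--     for size in sizes:
--         width, height = size
--
--         if width < height:
--             width, height = height, width
--
--         max_width = max(max_width, width)
--         max_height = max(max_height, height)
--
--     wallet_size = max_width * max_height
--
--     return wallet_size
-- ===== SOURCE B (Python) =====
-- def solution(sizes):
--     def dims(cards):
--         if not cards:
--             return (0, 0)
--         a, b = cards[0]
--         W, H = dims(cards[1:])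
--         return (max(W, a, b), max(H, min(a, b)))
--
--     W, H = dims(sizes)
--     return W * H
-- ===== Notes on version B (the rewrite author's own statement) =====
-- stated objective: alternative
-- what changed: Replaces A's iterative front-to-back loop with swap and two mutable running maxima by a recursive back-to-front decomposition that folds each card into the result of the rest via max(W, a, b) and max(H, min(a, b)) with no swap.
import Mathlib
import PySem

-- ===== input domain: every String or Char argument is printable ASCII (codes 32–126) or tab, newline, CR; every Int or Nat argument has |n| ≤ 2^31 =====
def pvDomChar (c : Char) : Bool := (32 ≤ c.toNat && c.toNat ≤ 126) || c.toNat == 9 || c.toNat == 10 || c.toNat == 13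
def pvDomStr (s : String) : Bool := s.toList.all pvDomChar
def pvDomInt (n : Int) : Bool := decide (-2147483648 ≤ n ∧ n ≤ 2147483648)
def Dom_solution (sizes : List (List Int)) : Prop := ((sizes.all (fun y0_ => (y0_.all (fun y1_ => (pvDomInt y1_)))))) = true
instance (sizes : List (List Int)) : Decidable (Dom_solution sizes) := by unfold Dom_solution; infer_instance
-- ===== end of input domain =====

-- B replaces A's iterative loop (swap + two running maxima) by a recursive
-- back-to-front decomposition combining each card with max(W,a,b) / max(H,min(a,b)).


-- ===== PORT A =====
-- one loop step: unpack the card, swap so width ≥ height, update both running maxima.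
-- (a card whose length is not 2 makes Python raise ValueError; excluded by Pre_, state kept here)
def solutionStep (acc : Int × Int) (size : List Int) : Int × Int :=
  match size with
  | [w0, h0] =>
    let wh := if w0 < h0 then (h0, w0) else (w0, h0)
    (max acc.1 wh.1, max acc.2 wh.2)
  | _ => acc

def solution (sizes : List (List Int)) : Int :=
  let p := sizes.foldl solutionStep (0, 0)
  p.1 * p.2

-- ===== PORT B =====
-- recursive back-to-front: dims of the tail, then fold the head card in.
-- (a non-pair card raises in Python's `a, b = cards[0]`; excluded by Pre_, tail kept here)
def dimsB : List (List Int) → Int × Int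
  | [] => (0, 0)
  | c :: rest =>
    match c with
    | [a, b] =>
      let p := dimsB rest
      (max (max p.1 a) b, max p.2 (min a b))
    | _ => dimsB rest

def solution_alt (sizes : List (List Int)) : Int :=
  let p := dimsB sizes
  p.1 * p.2

-- ===== PRECONDITION & SPEC =====
-- Pre_ excludes only cards that are not [w, h] pairs: Python's unpacking raises ValueError there.
def Pre_solution (sizes : List (List Int)) : Prop := ∀ s ∈ sizes, s.length = 2
instance (sizes : List (List Int)) : Decidable (Pre_solution sizes) := by unfold Pre_solution; infer_instance

def pvWitness_solution : List (List Int) := [[1, 2], [3, 1]]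

def Spec_solution (sizes : List (List Int)) (out : Int) : Prop := out = solution_alt sizes
instance (sizes : List (List Int)) (out : Int) : Decidable (Spec_solution sizes out) := by unfold Spec_solution; infer_instance

-- ===== CLAIM (what is proved, stated in full; the proofs are below) =====
def Claim_equal_solution : Prop := ∀ (sizes : List (List Int)), Dom_solution sizes → Pre_solution sizes → Spec_solution sizes (solution sizes)

-- ===== LEMMAS AND PROOFS =====
-- A's left fold from (mw, mh) equals (mw, mh) merged with B's recursive dims.
theorem dimsB_nonneg (sizes : List (List Int)) :
    0 ≤ (dimsB sizes).1 ∧ 0 ≤ (dimsB sizes).2 := by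
  induction sizes with
  | nil => simp [dimsB]
  | cons s t ih =>
    match s with
    | [a, b] => simp only [dimsB]; constructor <;> simp <;> omega
    | [] => simpa [dimsB] using ih
    | [a] => simpa [dimsB] using ih
    | a :: b :: c :: r => simpa [dimsB] using ih

-- A's left fold from a nonnegative (mw, mh) equals (mw, mh) merged with B's recursive dims.
theorem foldl_step_dims (sizes : List (List Int)) :
    ∀ mw mh : Int, 0 ≤ mw → 0 ≤ mh → sizes.foldl solutionStep (mw, mh) =
      (max mw (dimsB sizes).1, max mh (dimsB sizes).2) := by
  induction sizes with
  | nil => intro mw mh h1 h2; simp [dimsB]; omega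
  | cons s t ih =>
    intro mw mh h1 h2
    match s with
    | [a, b] =>
      simp only [List.foldl_cons, solutionStep, dimsB]
      split_ifs with hlt <;> rw [ih _ _ (by simp; omega) (by simp; omega)] <;>
        refine Prod.ext ?_ ?_ <;> simp <;> omega
    | [] => simp only [List.foldl_cons, solutionStep, dimsB]; exact ih mw mh h1 h2
    | [a] => simp only [List.foldl_cons, solutionStep, dimsB]; exact ih mw mh h1 h2
    | a :: b :: c :: r => simp only [List.foldl_cons, solutionStep, dimsB]; exact ih mw mh h1 h2

-- ===== VERDICT (by name: the statement is the Claim_ definition above) =====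
theorem solution_spec : Claim_equal_solution := by
  intro sizes _ _
  unfold Spec_solution solution solution_alt
  rw [foldl_step_dims sizes 0 0 le_rfl le_rfl]
  have h := dimsB_nonneg sizes
  simp
  rw [max_eq_right h.1, max_eq_right h.2]
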